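-- pv_equiv track=rewrite | github.com/tomhyhan/PEuler | solved/bmov.py | solution
-- ===== SOURCE A (Python) =====
-- def solution(n, m, x, y, queries):
--     # 0 - left, 1 - right, 2 - up, 3 - down
--     y1, x1, y2, x2 = x, y, x, y
--
--     bb = n-1
--     rb = m-1
--
--     for query in reversed(queries):
--         dir, steps = query
--         if dir == 0:
--             if x1 == 0:
--                 x2 = min(x2 + steps, rb)
--             else:
--                 if x1 + steps > rb:
--                     return 0
--                 x1 = min(x1 + steps, rb)
--                 x2 = min(x2 + steps, rb)
--         elif dir == 1:
--             if x2 == rb: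
--                 x1 = max(x1 - steps, 0)
--             else:
--                 if x2 - steps < 0:
--                     return 0
--                 x1 = max(x1 - steps, 0)
--                 x2 = max(x2 - steps, 0)
--         elif dir == 2:
--             if y1 == 0:
--                 y2 = min(y2 + steps, bb)
--             else:
--                 if y1 + steps > bb:
--                     return 0
--                 y1 = min(y1 + steps, bb)
--                 y2 = min(y2 + steps, bb)
--         elif dir == 3:
--             if y2 == bb:
--                 y1 = max(y1 - steps, 0)
--             else:
--                 if y2 - steps < 0:
--                     return 0
--                 y1 = max(y1 - steps, 0)
--                 y2 = max(y2 - steps, 0)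
--
--     return (x2-x1+1)*(y2-y1+1)
-- ===== SOURCE B (Python) =====
-- def _axis(lo, hi, bound, moves):
--     # one-dimensional interval tracking; moves = list of (grow, steps) in order.
--     # Returns (lo, hi) or None if infeasible.
--     for grow, steps in moves:
--         if grow:
--             if lo == 0:
--                 hi = min(hi + steps, bound)
--             else:
--                 if lo + steps > bound:
--                     return None
--                 lo = min(lo + steps, bound)
--                 hi = min(hi + steps, bound)
--         else:
--             if hi == bound:
--                 lo = max(lo - steps, 0)
--             else:
--                 if hi - steps < 0:
--                     return None
--                 lo = max(lo - steps, 0)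
--                 hi = max(hi - steps, 0)
--     return lo, hi
--
-- def solution(n, m, x, y, queries):
--     rq = list(reversed(queries))
--     xs = _axis(y, y, m - 1, [(d == 0, s) for d, s in rq if d in (0, 1)])
--     ys = _axis(x, x, n - 1, [(d == 2, s) for d, s in rq if d in (2, 3)])
--     if xs is None or ys is None:
--         return 0
--     return (xs[1] - xs[0] + 1) * (ys[1] - ys[0] + 1)
-- ===== Notes on version B (the rewrite author's own statement) =====
-- stated objective: alternative
-- what changed: B decomposes the problem by axis: it splits the reversed queries into horizontal (dir 0/1) and vertical (dir 2/3) streams and runs a single generic 1-D interval routine twice, multiplying the two extents at the end, instead of A's one loop over a four-component state with four inlined branches and early returns.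
import Mathlib
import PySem

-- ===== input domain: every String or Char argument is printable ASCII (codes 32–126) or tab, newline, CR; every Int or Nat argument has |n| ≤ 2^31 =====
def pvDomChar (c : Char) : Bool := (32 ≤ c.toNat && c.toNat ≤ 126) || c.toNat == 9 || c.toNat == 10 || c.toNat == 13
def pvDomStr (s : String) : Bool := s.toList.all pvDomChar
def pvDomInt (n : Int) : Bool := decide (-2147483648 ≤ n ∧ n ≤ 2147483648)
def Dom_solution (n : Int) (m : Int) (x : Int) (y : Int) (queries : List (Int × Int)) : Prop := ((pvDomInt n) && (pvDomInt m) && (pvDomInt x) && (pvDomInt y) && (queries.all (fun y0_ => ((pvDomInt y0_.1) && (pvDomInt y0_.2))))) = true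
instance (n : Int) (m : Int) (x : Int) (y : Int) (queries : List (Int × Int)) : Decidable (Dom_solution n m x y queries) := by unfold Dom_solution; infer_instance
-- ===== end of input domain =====

-- B splits the reversed queries into the two independent axes and runs one generic
-- 1-D interval routine twice (objective: simpler decomposition; same cost).


-- ===== PORT A =====
-- literal transliteration of A's single loop over reversed(queries) with the
-- four-component state (y1, x1, y2, x2) and early 'return 0'
def solLoop (bb rb : Int) : List (Int × Int) → Int → Int → Int → Int → Int
  | [], y1, x1, y2, x2 => (x2 - x1 + 1) * (y2 - y1 + 1)
  | (dir, steps) :: rest, y1, x1, y2, x2 =>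
    if dir = 0 then
      if x1 = 0 then solLoop bb rb rest y1 x1 y2 (min (x2 + steps) rb)
      else if x1 + steps > rb then 0
      else solLoop bb rb rest y1 (min (x1 + steps) rb) y2 (min (x2 + steps) rb)
    else if dir = 1 then
      if x2 = rb then solLoop bb rb rest y1 (max (x1 - steps) 0) y2 x2
      else if x2 - steps < 0 then 0
      else solLoop bb rb rest y1 (max (x1 - steps) 0) y2 (max (x2 - steps) 0)
    else if dir = 2 then
      if y1 = 0 then solLoop bb rb rest y1 x1 (min (y2 + steps) bb) x2
      else if y1 + steps > bb then 0
      else solLoop bb rb rest (min (y1 + steps) bb) x1 (min (y2 + steps) bb) x2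
    else if dir = 3 then
      if y2 = bb then solLoop bb rb rest (max (y1 - steps) 0) x1 y2 x2
      else if y2 - steps < 0 then 0
      else solLoop bb rb rest (max (y1 - steps) 0) x1 (max (y2 - steps) 0) x2
    else solLoop bb rb rest y1 x1 y2 x2

def solution (n : Int) (m : Int) (x : Int) (y : Int) (queries : List (Int × Int)) : Int :=
  solLoop (n - 1) (m - 1) queries.reverse x y x y

-- ===== PORT B =====
-- one step of the generic 1-D interval routine _axis
def axisStep (bound lo hi : Int) (grow : Bool) (steps : Int) : Option (Int × Int) :=
  if grow then
    if lo = 0 then some (lo, min (hi + steps) bound)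
    else if lo + steps > bound then none
    else some (min (lo + steps) bound, min (hi + steps) bound)
  else
    if hi = bound then some (max (lo - steps) 0, hi)
    else if hi - steps < 0 then none
    else some (max (lo - steps) 0, max (hi - steps) 0)

-- the loop of _axis
def axisLoop (bound : Int) : Int → Int → List (Bool × Int) → Option (Int × Int)
  | lo, hi, [] => some (lo, hi)
  | lo, hi, (g, s) :: ms =>
    match axisStep bound lo hi g s with
    | none => none
    | some (lo', hi') => axisLoop bound lo' hi' ms

def solution_alt (n : Int) (m : Int) (x : Int) (y : Int) (queries : List (Int × Int)) : Int :=
  let rq := queries.reverse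
  let xs := axisLoop (m - 1) y y
      ((rq.filter (fun q => q.1 == 0 || q.1 == 1)).map (fun q => (q.1 == 0, q.2)))
  let ys := axisLoop (n - 1) x x
      ((rq.filter (fun q => q.1 == 2 || q.1 == 3)).map (fun q => (q.1 == 2, q.2)))
  match xs, ys with
  | some (a, b), some (c, d) => (b - a + 1) * (d - c + 1)
  | _, _ => 0

-- ===== PRECONDITION & SPEC =====
def Spec_solution (n : Int) (m : Int) (x : Int) (y : Int) (queries : List (Int × Int)) (out : Int) : Prop := out = solution_alt n m x y queries
instance (n : Int) (m : Int) (x : Int) (y : Int) (queries : List (Int × Int)) (out : Int) : Decidable (Spec_solution n m x y queries out) := by unfold Spec_solution; infer_instance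

-- ===== CLAIM (what is proved, stated in full; the proofs are below) =====
def Claim_equal_solution : Prop := ∀ (n : Int) (m : Int) (x : Int) (y : Int) (queries : List (Int × Int)), Dom_solution n m x y queries → Spec_solution n m x y queries (solution n m x y queries)

-- ===== LEMMAS AND PROOFS =====

-- combine the two axis results as B's final 'if … return 0 / product' does
def pvCombine : Option (Int × Int) → Option (Int × Int) → Int
  | some (a, b), some (c, d) => (b - a + 1) * (d - c + 1)
  | _, _ => 0

def fX (l : List (Int × Int)) : List (Bool × Int) :=
  (l.filter (fun q => q.1 == 0 || q.1 == 1)).map (fun q => (q.1 == 0, q.2))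
def fY (l : List (Int × Int)) : List (Bool × Int) :=
  (l.filter (fun q => q.1 == 2 || q.1 == 3)).map (fun q => (q.1 == 2, q.2))

lemma pvCombine_none_left (o : Option (Int × Int)) : pvCombine none o = 0 := by
  cases o with
  | none => rfl
  | some p => cases p; rfl

lemma pvCombine_none_right (o : Option (Int × Int)) : pvCombine o none = 0 := by
  cases o with
  | none => rfl
  | some p => cases p; rfl

-- the crux: A's interleaved four-state loop equals B's two independent axis loops
lemma loop_eq (bb rb : Int) (l : List (Int × Int)) : ∀ (y1 x1 y2 x2 : Int),
    solLoop bb rb l y1 x1 y2 x2 =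
      pvCombine (axisLoop rb x1 x2 (fX l)) (axisLoop bb y1 y2 (fY l)) := by
  induction l with
  | nil => intro y1 x1 y2 x2; rfl
  | cons q rest ih =>
    intro y1 x1 y2 x2
    obtain ⟨dir, steps⟩ := q
    by_cases h0 : dir = 0
    · subst h0
      simp only [fX, fY, List.filter_cons, solLoop]
      by_cases hx : x1 = 0
      · simp [hx, axisLoop, axisStep, ih, fX, fY]
      · by_cases hb : x1 + steps > rb
        · simp [hx, hb, axisLoop, axisStep, pvCombine_none_left]
        · simp [hx, hb, axisLoop, axisStep, ih, fX, fY]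
    · by_cases h1 : dir = 1
      · subst h1
        simp only [fX, fY, List.filter_cons, solLoop]
        by_cases hx : x2 = rb
        · simp [hx, axisLoop, axisStep, ih, fX, fY]
        · by_cases hb : x2 - steps < 0
          · simp [hx, hb, axisLoop, axisStep, pvCombine_none_left]
          · simp [hx, hb, axisLoop, axisStep, ih, fX, fY]
      · by_cases h2 : dir = 2
        · subst h2
          simp only [fX, fY, List.filter_cons, solLoop]
          by_cases hy : y1 = 0
          · simp [hy, axisLoop, axisStep, ih, fX, fY]
          · by_cases hb : y1 + steps > bb
            · simp [hy, hb, axisLoop, axisStep, pvCombine_none_right]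
            · simp [hy, hb, axisLoop, axisStep, ih, fX, fY]
        · by_cases h3 : dir = 3
          · subst h3
            simp only [fX, fY, List.filter_cons, solLoop]
            by_cases hy : y2 = bb
            · simp [hy, axisLoop, axisStep, ih, fX, fY]
            · by_cases hb : y2 - steps < 0
              · simp [hy, hb, axisLoop, axisStep, pvCombine_none_right]
              · simp [hy, hb, axisLoop, axisStep, ih, fX, fY]
          · simp only [fX, fY, List.filter_cons, solLoop]
            simp [h0, h1, h2, h3, ih, fX, fY]

lemma alt_eq_combine (n m x y : Int) (queries : List (Int × Int)) :
    solution_alt n m x y queries =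
      pvCombine (axisLoop (m - 1) y y (fX queries.reverse))
                (axisLoop (n - 1) x x (fY queries.reverse)) := by
  unfold solution_alt pvCombine fX fY
  rfl

-- ===== VERDICT (by name: the statement is the Claim_ definition above) =====
theorem solution_spec : Claim_equal_solution := by
  intro n m x y queries _
  unfold Spec_solution solution
  rw [alt_eq_combine, loop_eq]
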